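-- pv_equiv track=rewrite | github.com/primust-dev/primust-sdk | packages/policy-engine-py/src/primust_policy_engine/manifest_validator.py | compute_proof_ceiling
-- ===== SOURCE A (Python) =====
-- from typing import Any, Literal
--
-- PROOF_LEVEL_HIERARCHY: list[str] = [
--     "mathematical",
--     "execution_zkml",
--     "execution",
--     "witnessed",
--     "attestation",
-- ]
--
-- def _proof_level_rank(level: str) -> int:
--     try:
--         return PROOF_LEVEL_HIERARCHY.index(level)
--     except ValueError:
--         raise ValueError(f"Unknown proof level: {level}")
--
-- def compute_proof_ceiling(manifest: dict[str, Any]) -> str: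
--     """Compute the proof ceiling: weakest stage.proof_level across all stages."""
--     stages = manifest.get("stages", [])
--     if not stages:
--         return "attestation"
--
--     weakest = stages[0]["proof_level"]
--     for stage in stages:
--         if _proof_level_rank(stage["proof_level"]) > _proof_level_rank(weakest):
--             weakest = stage["proof_level"]
--     return weakest
-- ===== SOURCE B (Python) =====
-- PROOF_LEVEL_HIERARCHY: list[str] = [
--     "mathematical",
--     "execution_zkml",
--     "execution",
--     "witnessed",
--     "attestation",
-- ]
--
-- def compute_proof_ceiling(manifest: dict) -> str:
--     """Compute the proof ceiling: weakest stage.proof_level across all stages."""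
--     stages = manifest.get("stages", [])
--     present = set()
--     for stage in stages:
--         lvl = stage["proof_level"]
--         if lvl not in PROOF_LEVEL_HIERARCHY:
--             raise ValueError(f"Unknown proof level: {lvl}")
--         present.add(lvl)
--     for lvl in reversed(PROOF_LEVEL_HIERARCHY):
--         if lvl in present:
--             return lvl
--     return "attestation"
-- ===== Notes on version B (the rewrite author's own statement) =====
-- stated objective: idiomatic
-- what changed: Replaced A's running-max fold over per-stage hierarchy ranks (two list.index scans per stage) with one pass collecting the present levels into a set followed by a single scan of the fixed hierarchy from weakest to strongest returning the first present level.
import Mathlib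
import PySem

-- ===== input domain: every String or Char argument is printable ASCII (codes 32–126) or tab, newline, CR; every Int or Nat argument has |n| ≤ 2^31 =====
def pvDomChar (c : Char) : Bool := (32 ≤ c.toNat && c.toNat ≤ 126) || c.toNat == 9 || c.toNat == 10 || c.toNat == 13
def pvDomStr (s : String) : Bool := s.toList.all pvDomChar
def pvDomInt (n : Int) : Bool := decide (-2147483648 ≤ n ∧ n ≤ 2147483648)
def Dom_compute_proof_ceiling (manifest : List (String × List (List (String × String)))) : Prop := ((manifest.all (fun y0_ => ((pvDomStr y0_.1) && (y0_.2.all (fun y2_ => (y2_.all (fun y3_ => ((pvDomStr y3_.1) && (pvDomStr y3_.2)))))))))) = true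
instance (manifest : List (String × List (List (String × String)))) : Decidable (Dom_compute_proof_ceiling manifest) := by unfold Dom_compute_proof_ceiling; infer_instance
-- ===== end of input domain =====

-- B replaces A's running-max-over-ranks fold with a membership set plus one scan of the
-- fixed hierarchy from weakest to strongest (objective: idiomatic; same return value).

-- ===== PORT A =====
def PROOF_LEVEL_HIERARCHY : List String :=
  ["mathematical", "execution_zkml", "execution", "witnessed", "attestation"]

-- Python: PROOF_LEVEL_HIERARCHY.index(level); an unknown level raises ValueError,
-- excluded by Pre_, so the `none` branch (default 0) is unreachable under the claim.
def _proof_level_rank (level : String) : Int :=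
  match PySem.List.index? PROOF_LEVEL_HIERARCHY level with
  | some i => (i : Int)
  | none => 0

def compute_proof_ceiling (manifest : List (String × List (List (String × String)))) : String :=
  let stages := PySem.Dict.getD (PySem.Dict.mk manifest) "stages" []
  if stages = [] then "attestation"
  else
    -- stages[0]["proof_level"]; a missing key raises KeyError in Python (excluded by Pre_)
    let weakest := (PySem.Dict.get? (PySem.Dict.mk ((PySem.List.pyGet? stages 0).getD [])) "proof_level").getD ""
    stages.foldl (fun w st =>
      let l := (PySem.Dict.get? (PySem.Dict.mk st) "proof_level").getD ""
      if _proof_level_rank l > _proof_level_rank w then l else w) weakest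

-- ===== PORT B =====
def compute_proof_ceiling_alt (manifest : List (String × List (List (String × String)))) : String :=
  let stages := PySem.Dict.getD (PySem.Dict.mk manifest) "stages" []
  -- one pass building the set of present levels (the unknown-level ValueError of Source B
  -- is excluded by Pre_, so the validation raise has no value to produce here)
  let present := stages.foldl
    (fun s st => PySem.Set.add s ((PySem.Dict.get? (PySem.Dict.mk st) "proof_level").getD "")) PySem.Set.empty
  match PROOF_LEVEL_HIERARCHY.reverse.find? (fun l => PySem.Set.contains present l) with
  | some l => l
  | none => "attestation"

-- ===== PRECONDITION & SPEC =====
-- Pre_ excludes exactly the inputs on which Python A raises: a stage dict without a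
-- "proof_level" key (KeyError) or with a level outside the hierarchy (ValueError).
def Pre_compute_proof_ceiling (manifest : List (String × List (List (String × String)))) : Prop :=
  ∀ st ∈ PySem.Dict.getD (PySem.Dict.mk manifest) "stages" [],
    PySem.Dict.get? (PySem.Dict.mk st) "proof_level" ∈
      [some "mathematical", some "execution_zkml", some "execution", some "witnessed", some "attestation"]
instance (manifest : List (String × List (List (String × String)))) : Decidable (Pre_compute_proof_ceiling manifest) := by unfold Pre_compute_proof_ceiling; infer_instance

def pvWitness_compute_proof_ceiling : (List (String × List (List (String × String)))) :=
  [("stages", [[("proof_level", "execution")], [("proof_level", "witnessed")]])]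

def Spec_compute_proof_ceiling (manifest : List (String × List (List (String × String)))) (out : String) : Prop := out = compute_proof_ceiling_alt manifest
instance (manifest : List (String × List (List (String × String)))) (out : String) : Decidable (Spec_compute_proof_ceiling manifest out) := by unfold Spec_compute_proof_ceiling; infer_instance

-- ===== CLAIM (what is proved, stated in full; the proofs are below) =====
def Claim_equal_compute_proof_ceiling : Prop := ∀ (manifest : List (String × List (List (String × String)))), Dom_compute_proof_ceiling manifest → Pre_compute_proof_ceiling manifest → Spec_compute_proof_ceiling manifest (compute_proof_ceiling manifest)

-- ===== LEMMAS AND PROOFS =====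

-- the weakest (max-rank) level among ls, as a membership if-chain
def pvTgt (ls : List String) : String :=
  if "attestation" ∈ ls then "attestation"
  else if "witnessed" ∈ ls then "witnessed"
  else if "execution" ∈ ls then "execution"
  else if "execution_zkml" ∈ ls then "execution_zkml"
  else "mathematical"

lemma pvTgt_dup (x : String) (t : List String) : pvTgt (x :: x :: t) = pvTgt (x :: t) := by
  simp [pvTgt, List.mem_cons]

lemma pvRank_math : _proof_level_rank "mathematical" = 0 := by decide
lemma pvRank_zkml : _proof_level_rank "execution_zkml" = 1 := by decide
lemma pvRank_exec : _proof_level_rank "execution" = 2 := by decide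
lemma pvRank_wit : _proof_level_rank "witnessed" = 3 := by decide
lemma pvRank_att : _proof_level_rank "attestation" = 4 := by decide

lemma pvStep_tgt (w h : String) (t : List String)
    (hw : w ∈ PROOF_LEVEL_HIERARCHY) (hh : h ∈ PROOF_LEVEL_HIERARCHY) :
    pvTgt ((if _proof_level_rank h > _proof_level_rank w then h else w) :: t)
      = pvTgt (w :: h :: t) := by
  simp only [PROOF_LEVEL_HIERARCHY, List.mem_cons, List.not_mem_nil, or_false] at hw hh
  rcases hw with rfl | rfl | rfl | rfl | rfl <;>
    rcases hh with rfl | rfl | rfl | rfl | rfl <;>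
      simp [pvTgt, pvRank_math, pvRank_zkml, pvRank_exec, pvRank_wit, pvRank_att,
        List.mem_cons]

lemma pvFoldA (ls : List String) (w : String)
    (hw : w ∈ PROOF_LEVEL_HIERARCHY) (hls : ∀ l ∈ ls, l ∈ PROOF_LEVEL_HIERARCHY) :
    ls.foldl (fun w l => if _proof_level_rank l > _proof_level_rank w then l else w) w
      = pvTgt (w :: ls) := by
  induction ls generalizing w with
  | nil =>
    simp only [PROOF_LEVEL_HIERARCHY, List.mem_cons, List.not_mem_nil, or_false] at hw
    rcases hw with rfl | rfl | rfl | rfl | rfl <;> simp [pvTgt]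
  | cons h t ih =>
    have hh : h ∈ PROOF_LEVEL_HIERARCHY := hls h (by simp)
    have hstep : (if _proof_level_rank h > _proof_level_rank w then h else w) ∈ PROOF_LEVEL_HIERARCHY := by
      split <;> assumption
    rw [List.foldl_cons, ih _ hstep (fun l hl => hls l (by simp [hl])), pvStep_tgt w h t hw hh]

lemma pvAltTgt (ls : List String) (hne : ls ≠ []) (hls : ∀ l ∈ ls, l ∈ PROOF_LEVEL_HIERARCHY) :
    (match PROOF_LEVEL_HIERARCHY.reverse.find? (fun l => PySem.Set.contains (PySem.Set.ofList ls) l) with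
      | some l => l
      | none => "attestation") = pvTgt ls := by
  have hc : ∀ x : String, PySem.Set.contains (PySem.Set.ofList ls) x = decide (x ∈ ls) := by
    intro x
    simp only [PySem.Set.contains_eq_listContains, List.contains_eq_mem, PySem.Set.mem_ofList]
  simp only [show PROOF_LEVEL_HIERARCHY.reverse
      = ["attestation", "witnessed", "execution", "execution_zkml", "mathematical"] from rfl,
    List.find?, hc, pvTgt]
  by_cases h1 : "attestation" ∈ ls <;>
    by_cases h2 : "witnessed" ∈ ls <;>
      by_cases h3 : "execution" ∈ ls <;>
        by_cases h4 : "execution_zkml" ∈ ls <;>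
          simp [h1, h2, h3, h4]
  -- remaining case: none of the four present, so every element is "mathematical"
  · obtain ⟨l, hl⟩ := List.exists_mem_of_ne_nil ls hne
    have := hls l hl
    simp only [PROOF_LEVEL_HIERARCHY, List.mem_cons, List.not_mem_nil, or_false] at this
    rcases this with rfl | rfl | rfl | rfl | rfl <;> first
      | exact absurd hl h1 | exact absurd hl h2 | exact absurd hl h3 | exact absurd hl h4
      | simp [hl]

-- ===== VERDICT (by name: the statement is the Claim_ definition above) =====
theorem compute_proof_ceiling_spec : Claim_equal_compute_proof_ceiling := by
  intro manifest _hdom hpre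
  unfold Spec_compute_proof_ceiling compute_proof_ceiling compute_proof_ceiling_alt
  set stages := PySem.Dict.getD (PySem.Dict.mk manifest) "stages" [] with hst
  unfold Pre_compute_proof_ceiling at hpre
  rw [← hst] at hpre
  set lvl : List (String × String) → String :=
    fun st => (PySem.Dict.get? (PySem.Dict.mk st) "proof_level").getD "" with hlvl
  have hmem : ∀ st ∈ stages, lvl st ∈ PROOF_LEVEL_HIERARCHY := by
    intro st hstm
    have := hpre st hstm
    simp only [List.mem_cons, List.not_mem_nil, or_false] at this
    rcases this with h | h | h | h | h <;>
      simp [hlvl, h, PROOF_LEVEL_HIERARCHY]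
  -- B side: the built set is the set of levels
  have hfold : stages.foldl (fun s st => PySem.Set.add s (lvl st)) PySem.Set.empty
      = PySem.Set.ofList (stages.map lvl) := by
    rw [PySem.Set.ofList_eq_foldl, ← List.foldl_map]
    rfl
  cases hst' : stages with
  | nil =>
    simp
    rfl
  | cons s0 rest =>
    have hne : stages ≠ [] := by simp [hst']
    have hls : ∀ l ∈ stages.map lvl, l ∈ PROOF_LEVEL_HIERARCHY := by
      intro l hl
      obtain ⟨st, hstm, rfl⟩ := List.mem_map.mp hl
      exact hmem st hstm
    simp only [hst'] at hne hls hfold ⊢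
    rw [if_neg (by simp)]
    have h0 : (PySem.Dict.get? (PySem.Dict.mk ((PySem.List.pyGet? (s0 :: rest) 0).getD [])) "proof_level").getD ""
        = lvl s0 := by
      simp [PySem.List.pyGet?, PySem.List.pyIdx?, hlvl]
    rw [h0]
    have hA : (s0 :: rest).foldl (fun w st => if _proof_level_rank (lvl st) > _proof_level_rank w then lvl st else w) (lvl s0)
        = ((s0 :: rest).map lvl).foldl (fun w l => if _proof_level_rank l > _proof_level_rank w then l else w) (lvl s0) := by
      rw [List.foldl_map]
    rw [hA, pvFoldA _ _ (hls (lvl s0) (by simp)) hls]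
    rw [hfold, pvAltTgt _ (by simp) hls]
    have : lvl s0 :: (s0 :: rest).map lvl = lvl s0 :: lvl s0 :: rest.map lvl := by simp
    rw [this, pvTgt_dup]
    simp
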